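-- pv_equiv track=rewrite | github.com/calebrc1/purerackdiagram | PureRackdiagram.py | get_chassis_fm_loc
-- ===== SOURCE A (Python) =====
-- def get_chassis_fm_loc(model = 'x'):
--     ch0_fm_loc = [None] * 28
--     ch0_fm_loc[0] = (165, 250)
--     ch0_fm_loc[4] = (714, 250)
--     ch0_fm_loc[8] = (1265, 250)
--     ch0_fm_loc[12] = (1817, 250)
--     ch0_fm_loc[20] = (164, 27)
--
--     x_offset = 105
--     for x in range(20):
--         if ch0_fm_loc[x] is None:
--             loc = list(ch0_fm_loc[x - 1])
--             loc[0] += int(x_offset)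
--             ch0_fm_loc[x] = tuple(loc)
--
--     y_offset = x_offset
--     x_offset = 550
--     for x in range(20, 28):
--         if ch0_fm_loc[x] is None:
--             loc = list(ch0_fm_loc[x - 1])
--             if x % 2 == 0:
--                 loc[0] += x_offset
--                 loc[1] -= y_offset
--             else:
--                 loc[1] += y_offset
--             ch0_fm_loc[x] = tuple(loc)
--
--     if model != 'x':
--         #adjust slightly for the //m image
--         for x in range(len(ch0_fm_loc)):
--             ch0_fm_loc[x] = (ch0_fm_loc[x][0] - 9, ch0_fm_loc[x][1] - 7)
--
--     return ch0_fm_loc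
-- ===== SOURCE B (Python) =====
-- def get_chassis_fm_loc(model='x'):
--     # closed-form table: three 4-wide rows, one 8-wide row, then 4 column pairs
--     locs = [(b + 105 * j, 250) for b in (165, 714, 1265) for j in range(4)]
--     locs += [(1817 + 105 * j, 250) for j in range(8)]
--     locs += [(164 + 550 * k, 27 + 105 * p) for k in range(4) for p in range(2)]
--     if model != 'x':
--         locs = [(x - 9, y - 7) for x, y in locs]
--     return locs
-- ===== Notes on version B (the rewrite author's own statement) =====
-- stated objective: simpler
-- what changed: Replaces the None-sentinel seed-and-chain mutation loops with a direct closed-form comprehension table (base + 105*j per block, 550*k/105*p for the top row) plus a uniform shift comprehension.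
import Mathlib
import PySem

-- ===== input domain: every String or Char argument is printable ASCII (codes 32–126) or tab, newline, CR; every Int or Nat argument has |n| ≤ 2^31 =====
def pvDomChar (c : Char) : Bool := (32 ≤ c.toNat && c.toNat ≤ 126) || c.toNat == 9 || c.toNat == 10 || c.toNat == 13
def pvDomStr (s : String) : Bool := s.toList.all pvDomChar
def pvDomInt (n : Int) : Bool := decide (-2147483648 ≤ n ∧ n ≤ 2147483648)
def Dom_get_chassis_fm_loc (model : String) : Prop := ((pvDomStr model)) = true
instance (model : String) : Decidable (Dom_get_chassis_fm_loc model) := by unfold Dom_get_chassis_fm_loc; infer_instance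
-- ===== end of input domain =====

-- B replaces A's None-sentinel seed-and-chain loops with a closed-form comprehension table (simpler).

-- ===== PORT A =====
-- first loop body: if ch0_fm_loc[x] is None, copy previous entry and add 105 to x-coordinate
def pvStepA1 (l : List (Option (Int × Int))) (x : Int) : List (Option (Int × Int)) :=
  match PySem.List.pyGetD l x none with
  | none =>
      -- ch0_fm_loc[x-1] is always a filled tuple when this branch runs; getD never hits its default
      let p := (PySem.List.pyGetD l (x - 1) none).getD (0, 0)
      PySem.List.pySetD l x (some (p.1 + 105, p.2))
  | some _ => l

-- second loop body (indices 20..27): even x adds 550 to x-coord and subtracts 105 from y; odd adds 105 to y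
def pvStepA2 (l : List (Option (Int × Int))) (x : Int) : List (Option (Int × Int)) :=
  match PySem.List.pyGetD l x none with
  | none =>
      let p := (PySem.List.pyGetD l (x - 1) none).getD (0, 0)
      if PySem.Int.mod x 2 = 0 then
        PySem.List.pySetD l x (some (p.1 + 550, p.2 - 105))
      else
        PySem.List.pySetD l x (some (p.1, p.2 + 105))
  | some _ => l

def get_chassis_fm_loc (model : String) : List (Int × Int) :=
  let l0 : List (Option (Int × Int)) :=
    ((((((List.replicate 28 none).set 0 (some (165, 250))).set 4 (some (714, 250))).set 8
        (some (1265, 250))).set 12 (some (1817, 250))).set 20 (some (164, 27)))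
  let l1 := (PySem.List.pyRange 0 20 1).foldl pvStepA1 l0
  let l2 := (PySem.List.pyRange 20 28 1).foldl pvStepA2 l1
  -- after both loops every entry is Some; .getD (0,0) only unwraps (Python returns the tuples directly)
  if model ≠ "x" then
    l2.map (fun o => ((o.getD (0, 0)).1 - 9, (o.getD (0, 0)).2 - 7))
  else
    l2.map (fun o => o.getD (0, 0))

-- ===== PORT B =====
def get_chassis_fm_loc_alt (model : String) : List (Int × Int) :=
  let locs : List (Int × Int) :=
    (([165, 714, 1265] : List Int).flatMap fun b =>
        (List.range 4).map fun j => (b + 105 * (j : Int), (250 : Int)))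
    ++ ((List.range 8).map fun j => ((1817 : Int) + 105 * (j : Int), (250 : Int)))
    ++ ((List.range 4).flatMap fun k =>
        (List.range 2).map fun p => ((164 : Int) + 550 * (k : Int), (27 : Int) + 105 * (p : Int)))
  if model ≠ "x" then locs.map (fun q => (q.1 - 9, q.2 - 7)) else locs

-- ===== PRECONDITION & SPEC =====
def Spec_get_chassis_fm_loc (model : String) (out : List (Int × Int)) : Prop := out = get_chassis_fm_loc_alt model
instance (model : String) (out : List (Int × Int)) : Decidable (Spec_get_chassis_fm_loc model out) := by unfold Spec_get_chassis_fm_loc; infer_instance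

-- ===== CLAIM (what is proved, stated in full; the proofs are below) =====
def Claim_equal_get_chassis_fm_loc : Prop := ∀ (model : String), Dom_get_chassis_fm_loc model → Spec_get_chassis_fm_loc model (get_chassis_fm_loc model)

-- ===== LEMMAS AND PROOFS =====

-- ===== VERDICT (by name: the statement is the Claim_ definition above) =====
set_option maxRecDepth 40000 in
theorem get_chassis_fm_loc_spec : Claim_equal_get_chassis_fm_loc := by
  intro model _
  unfold Spec_get_chassis_fm_loc get_chassis_fm_loc get_chassis_fm_loc_alt
  by_cases h : model = "x"
  · simp only [h]
    decide
  · simp only [if_pos h]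
    decide
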